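-- pv_equiv track=rewrite | github.com/jchenwth101/camel_case | a1_p5 camel_case.py | is_clean_string
-- ===== SOURCE A (Python) =====
-- def is_clean_string(input_string: str) -> bool:
--     """
--     TODO: Write this implementation
--     """
--     underscore_counter = 0
--
--     if input_string == '':
--         return True
--
--     if input_string[0] not in 'abcdefghijklmnopqrstuvwxyz':
--         return False
--
--     if input_string[-1] not in 'abcdefghijklmnopqrstuvwxyz':
--         return False
--
--     for i in input_string:
--         if i not in 'abcdefghijklmnopqrstuvwxyz_':
--             return False
--         elif i == '_':
--             if underscore_counter >= 1:
--                 return False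
--             underscore_counter += 1
--         else:
--             underscore_counter = 0  # reset counter
--
--     return True
-- ===== SOURCE B (Python) =====
-- def is_clean_string(input_string: str) -> bool:
--     if input_string == '':
--         return True
--     return (all('a' <= c <= 'z' or c == '_' for c in input_string)
--             and not input_string.startswith('_')
--             and not input_string.endswith('_')
--             and '__' not in input_string)
-- ===== Notes on version B (the rewrite author's own statement) =====
-- stated objective: idiomatic
-- what changed: Replaced A's character loop with an explicit underscore counter and positional index checks by a single declarative conjunction: all characters lowercase or underscore, no leading or trailing underscore, and no two adjacent underscores (a substring test).
import Mathlib
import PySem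

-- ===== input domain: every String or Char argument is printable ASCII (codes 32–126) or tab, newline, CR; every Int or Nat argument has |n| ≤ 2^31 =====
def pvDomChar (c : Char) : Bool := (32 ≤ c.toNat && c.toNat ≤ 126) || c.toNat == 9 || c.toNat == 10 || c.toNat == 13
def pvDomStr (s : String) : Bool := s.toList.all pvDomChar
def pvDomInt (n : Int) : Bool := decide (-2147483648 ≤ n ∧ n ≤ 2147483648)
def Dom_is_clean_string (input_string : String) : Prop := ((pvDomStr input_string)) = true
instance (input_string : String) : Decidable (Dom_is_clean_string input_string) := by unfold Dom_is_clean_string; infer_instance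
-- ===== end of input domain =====

-- B replaces A's character loop with an underscore counter by a declarative conjunction
-- (allowed chars only, no edge underscore, no doubled underscore via a substring test); same behaviour, no speed claim.

-- ===== PORT A =====
-- the literal 'abcdefghijklmnopqrstuvwxyz'
def pvLower : List Char :=
  ['a','b','c','d','e','f','g','h','i','j','k','l','m','n','o','p','q','r','s','t','u','v','w','x','y','z']
-- the literal 'abcdefghijklmnopqrstuvwxyz_'
def pvLowerU : List Char :=
  ['a','b','c','d','e','f','g','h','i','j','k','l','m','n','o','p','q','r','s','t','u','v','w','x','y','z','_']

-- A's for-loop over the characters with the underscore_counter (early returns = false results)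
def pvLoopA : List Char → Nat → Bool
  | [], _ => true
  | c :: rest, k =>
    if !(pvLowerU.contains c) then false
    else if c == '_' then
      if k ≥ 1 then false else pvLoopA rest (k + 1)
    else pvLoopA rest 0

def is_clean_string (input_string : String) : Bool :=
  if input_string == "" then true
  -- input_string[0] / input_string[-1]: the string is nonempty here, so the default is never used (exact)
  else if !(pvLower.contains (PySem.List.pyGetD input_string.toList 0 ' ')) then false
  else if !(pvLower.contains (PySem.List.pyGetD input_string.toList (-1) ' ')) then false
  else pvLoopA input_string.toList 0

-- ===== PORT B =====
def is_clean_string_alt (input_string : String) : Bool :=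
  if input_string == "" then true
  else
    (input_string.toList.all fun c => (decide ('a' ≤ c) && decide (c ≤ 'z')) || c == '_')
    && !(PySem.Str.startswith input_string "_")
    && !(PySem.Str.endswith input_string "_")
    && !(PySem.Str.isIn "__" input_string)

-- ===== PRECONDITION & SPEC =====
def Spec_is_clean_string (input_string : String) (out : Bool) : Prop := out = is_clean_string_alt input_string
instance (input_string : String) (out : Bool) : Decidable (Spec_is_clean_string input_string out) := by unfold Spec_is_clean_string; infer_instance

-- ===== CLAIM (what is proved, stated in full; the proofs are below) =====
def Claim_equal_is_clean_string : Prop := ∀ (input_string : String), Dom_is_clean_string input_string → Spec_is_clean_string input_string (is_clean_string input_string)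

-- ===== LEMMAS AND PROOFS =====

-- B's per-character predicate
def pvPred (c : Char) : Bool := (decide ('a' ≤ c) && decide (c ≤ 'z')) || c == '_'

-- "the list starts with an underscore"
def pvStartsU : List Char → Bool
  | [] => false
  | c :: _ => c == '_'

-- "the list contains two consecutive underscores"
def pvHasDD : List Char → Bool
  | [] => false
  | c :: r => (c == '_' && pvStartsU r) || pvHasDD r

theorem pvChar_eq_iff (c d : Char) : (c == d) = true ↔ c.toNat = d.toNat := by
  rw [beq_iff_eq]
  exact ⟨fun h => by rw [h], fun h => Char.ext (UInt32.toNat_inj.mp h)⟩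

set_option maxHeartbeats 1000000 in
theorem pvMem_lower (c : Char) :
    pvLower.contains c = (decide ('a' ≤ c) && decide (c ≤ 'z')) := by
  rw [Bool.eq_iff_iff]
  have h2 : ('a' ≤ c) ↔ 97 ≤ c.toNat := Iff.rfl
  have h3 : (c ≤ 'z') ↔ c.toNat ≤ 122 := Iff.rfl
  simp only [pvLower, List.contains_cons, List.contains_nil, Bool.or_eq_true, pvChar_eq_iff,
    Bool.and_eq_true, decide_eq_true_eq, h2, h3, Bool.false_eq_true, or_false]
  show c.toNat = 97 ∨ c.toNat = 98 ∨ c.toNat = 99 ∨ c.toNat = 100 ∨ c.toNat = 101 ∨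
    c.toNat = 102 ∨ c.toNat = 103 ∨ c.toNat = 104 ∨ c.toNat = 105 ∨ c.toNat = 106 ∨
    c.toNat = 107 ∨ c.toNat = 108 ∨ c.toNat = 109 ∨ c.toNat = 110 ∨ c.toNat = 111 ∨
    c.toNat = 112 ∨ c.toNat = 113 ∨ c.toNat = 114 ∨ c.toNat = 115 ∨ c.toNat = 116 ∨
    c.toNat = 117 ∨ c.toNat = 118 ∨ c.toNat = 119 ∨ c.toNat = 120 ∨ c.toNat = 121 ∨
    c.toNat = 122 ↔ _
  omega

theorem pvMem_lowerU (c : Char) : pvLowerU.contains c = pvPred c := by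
  have h : pvLowerU = pvLower ++ ['_'] := rfl
  rw [h, List.contains_append, pvMem_lower]
  simp only [pvPred, List.contains_cons, List.contains_nil, Bool.or_false]

-- under pvPred, "lowercase" is exactly "not an underscore"
theorem pvChar_case (c : Char) (h : pvPred c = true) :
    (decide ('a' ≤ c) && decide (c ≤ 'z')) = !(c == '_') := by
  by_cases hu : (c == '_') = true
  · have hc : c = '_' := beq_iff_eq.mp hu
    subst hc; decide
  · simp only [Bool.not_eq_true] at hu
    simp only [pvPred, hu, Bool.or_false] at h
    simp [h, hu]

-- A's loop computes "all chars allowed and no double underscore";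
-- with counter 1 additionally "does not start with an underscore"
theorem pvLoopA_spec (l : List Char) :
    pvLoopA l 0 = (l.all pvPred && !pvHasDD l) ∧
    pvLoopA l 1 = (l.all pvPred && !pvHasDD l && !pvStartsU l) := by
  induction l with
  | nil => constructor <;> rfl
  | cons c r ih =>
    by_cases hu : (c == '_') = true
    · have hc : c = '_' := beq_iff_eq.mp hu
      subst hc
      constructor
      · show pvLoopA r 1 = _
        rw [ih.2]
        simp only [List.all_cons, pvHasDD, pvPred]
        cases h1 : r.all pvPred <;> cases h2 : pvHasDD r <;> cases h3 : pvStartsU r <;> decide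
      · have hL : pvLoopA ('_' :: r) 1 = false := rfl
        rw [hL]
        simp [pvStartsU]
    · have hcont : pvLowerU.contains c = pvPred c := pvMem_lowerU c
      by_cases hp : pvPred c = true
      · have hstep : pvLoopA (c :: r) 0 = pvLoopA r 0 ∧ pvLoopA (c :: r) 1 = pvLoopA r 0 := by
          constructor <;>
            · show (if !(pvLowerU.contains c) then false
                else if c == '_' then _ else pvLoopA r 0) = _
              rw [hcont, hp]
              simp [hu]
        rw [hstep.1, hstep.2, ih.1]
        simp only [List.all_cons, hp, Bool.true_and, pvHasDD, pvStartsU, hu]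
        constructor
        · rfl
        · cases h1 : r.all pvPred <;> cases h2 : pvHasDD r <;> simp
      · have hp' : pvPred c = false := by simpa using hp
        have hstep : ∀ k, pvLoopA (c :: r) k = false := by
          intro k
          show (if !(pvLowerU.contains c) then false else _) = false
          rw [hcont, hp']
          rfl
        rw [hstep 0, hstep 1]
        simp [List.all_cons, hp']

theorem pvStartsU_iff (l : List Char) : pvStartsU l = true ↔ ['_'] <+: l := by
  cases l with
  | nil => simp [pvStartsU]
  | cons c r =>
    simp only [pvStartsU, beq_iff_eq, List.cons_prefix_cons, List.nil_prefix, and_true]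
    exact eq_comm

theorem pvHasDD_iff (l : List Char) : pvHasDD l = true ↔ ['_', '_'] <:+: l := by
  induction l with
  | nil => simp [pvHasDD]
  | cons c r ih =>
    rw [List.infix_cons_iff]
    simp only [pvHasDD, Bool.or_eq_true, Bool.and_eq_true, beq_iff_eq, ih,
      List.cons_prefix_cons, pvStartsU_iff]
    exact or_congr (and_congr_left fun _ => eq_comm) Iff.rfl

theorem pvStartswith_eq (l : List Char) : PySem.Chars.startswith l ['_'] = pvStartsU l := by
  cases l with
  | nil => rfl
  | cons c r =>
    show ['_'].isPrefixOf (c :: r) = (c == '_')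
    simp [List.isPrefixOf]
    exact eq_comm

theorem pvEndswith_eq (l : List Char) (hne : l ≠ []) :
    PySem.Chars.endswith l ['_'] = (l.getLast hne == '_') := by
  rw [Bool.eq_iff_iff, PySem.Chars.endswith, List.isSuffixOf_iff_suffix]
  constructor
  · rintro ⟨t, rfl⟩
    simp
  · intro h
    refine ⟨l.dropLast, ?_⟩
    conv_rhs => rw [← List.dropLast_append_getLast hne]
    simp [beq_iff_eq.mp h]

theorem pvIsIn_eq (l : List Char) : PySem.Chars.isIn ['_', '_'] l = pvHasDD l := by
  rw [Bool.eq_iff_iff, PySem.Chars.isIn_iff_infix, pvHasDD_iff]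

-- the main list-level equality for a nonempty string
theorem pvMain (l : List Char) (hne : l ≠ []) :
    (if !(pvLower.contains (PySem.List.pyGetD l 0 ' ')) then false
     else if !(pvLower.contains (PySem.List.pyGetD l (-1) ' ')) then false
     else pvLoopA l 0)
    = (l.all pvPred
        && !(PySem.Chars.startswith l ['_'])
        && !(PySem.Chars.endswith l ['_'])
        && !(PySem.Chars.isIn ['_', '_'] l)) := by
  obtain ⟨c, r, rfl⟩ := List.exists_cons_of_ne_nil hne
  have h0 : PySem.List.pyGetD (c :: r) 0 ' ' = c := by
    simp [PySem.List.pyGetD, PySem.List.pyGet?, PySem.List.pyIdx?]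
  have h1 : PySem.List.pyGetD (c :: r) (-1) ' ' = (c :: r).getLast (by simp) := by
    simp [PySem.List.pyGetD, PySem.List.pyGet?, PySem.List.pyIdx?, List.getLast_eq_getElem]
    rfl
  rw [h0, h1, pvStartswith_eq, pvEndswith_eq _ hne, pvIsIn_eq, (pvLoopA_spec (c :: r)).1]
  by_cases hall : (c :: r).all pvPred = true
  · have hc : pvPred c = true := by
      rw [List.all_eq_true] at hall
      exact hall c (by simp)
    have hg : pvPred ((c :: r).getLast hne) = true := by
      rw [List.all_eq_true] at hall
      exact hall _ (List.getLast_mem hne)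
    rw [show pvLower.contains c = !(c == '_') from (pvMem_lower c).trans (pvChar_case c hc),
      show pvLower.contains ((c :: r).getLast hne) = !((c :: r).getLast hne == '_') from
        (pvMem_lower _).trans (pvChar_case _ hg)]
    have hsu : pvStartsU (c :: r) = (c == '_') := rfl
    rw [hsu, hall]
    cases hcu : (c == '_') <;> cases hgu : ((c :: r).getLast hne == '_') <;>
      cases hdd : pvHasDD (c :: r) <;> simp
  · have hall' : (c :: r).all pvPred = false := by simpa using hall
    rw [hall']
    split_ifs <;> simp

-- ===== VERDICT (by name: the statement is the Claim_ definition above) =====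
theorem is_clean_string_spec : Claim_equal_is_clean_string := by
  intro s _
  unfold Spec_is_clean_string is_clean_string is_clean_string_alt
  by_cases h : (s == "") = true
  · rw [h]; rfl
  · have h' : (s == "") = false := by simpa using h
    rw [h']
    have hne : s.toList ≠ [] := by
      intro hc
      have : s = "" := by
        have h2 := congrArg String.ofList hc
        simpa using h2
      simp [this] at h'
    show _ = _
    rw [PySem.Str.startswith, PySem.Str.endswith, PySem.Str.isIn,
      show ("_" : String).toList = ['_'] from rfl,
      show ("__" : String).toList = ['_', '_'] from rfl]
    exact pvMain s.toList hne
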